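-- pv_equiv track=rewrite | github.com/facebookresearch/fairo | craftassist/agent/size_words.py | size_str_to_range
-- ===== SOURCE A (Python) =====
-- RANGES = {
--     "tiny": (1, 3),
--     "small": (3, 4),
--     "medium": (4, 6),
--     "large": (6, 10),
--     "huge": (10, 16),
--     "gigantic": (16, 32),
-- }
--
-- MODIFIERS = ["very", "extremely", "really"]
--
-- WORD_SUBS = {"little": "small", "big": "large"}
--
-- def size_str_to_range(s, ranges=RANGES):
--     words = s.split()
--
--     # replace words in WORD_SUBS
--     for i in range(len(words)):
--         if words[i] in WORD_SUBS:
--             words[i] = WORD_SUBS[words[i]]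
--
--     is_modded = any(m in words for m in MODIFIERS)
--     med_idx = list(ranges.keys()).index("medium")
--     max_idx = len(ranges.keys())
--
--     for i, (word, rng) in enumerate(ranges.items()):
--         if word in words:
--             if is_modded and i < med_idx and i > 0:
--                 return list(ranges.values())[i - 1]
--             elif is_modded and i > med_idx and i < max_idx - 1:
--                 return list(ranges.values())[i + 1]
--             else:
--                 return list(ranges.values())[i]
--
--     return ranges["medium"]
-- ===== SOURCE B (Python) =====
-- RANGES = {
--     "tiny": (1, 3),
--     "small": (3, 4),
--     "medium": (4, 6),
--     "large": (6, 10),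
--     "huge": (10, 16),
--     "gigantic": (16, 32),
-- }
--
-- MODIFIERS = ["very", "extremely", "really"]
--
-- WORD_SUBS = {"little": "small", "big": "large"}
--
-- def size_str_to_range(s, ranges=RANGES):
--     # Single pass over the WORDS (not over the range keys): keep the minimum
--     # position of any size word seen, via a key->position dict; the first key
--     # of ranges present in the sentence is exactly the one of minimal position.
--     keys = list(ranges.keys())
--     vals = list(ranges.values())
--     n = len(keys)
--     med_idx = keys.index("medium")
--     pos = {k: i for i, k in enumerate(keys)}
--     is_modded = False
--     idx = n
--     for w in s.split():
--         w = WORD_SUBS.get(w, w)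
--         if w in MODIFIERS:
--             is_modded = True
--         j = pos.get(w, n)
--         if j < idx:
--             idx = j
--     if idx == n:
--         idx = med_idx
--     if is_modded:
--         if 0 < idx < med_idx:
--             idx -= 1
--         elif med_idx < idx < n - 1:
--             idx += 1
--     return vals[idx]
-- ===== Notes on version B (the rewrite author's own statement) =====
-- stated objective: alternative
-- what changed: B inverts the traversal: instead of A's scan over the range keys with a per-key 'key in words' list search and three-way early returns, B builds a key->position dict once and makes a single pass over the sentence words keeping the minimum matched position (and the modifier flag), then applies the shift arithmetic and one values lookup.
import Mathlib
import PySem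

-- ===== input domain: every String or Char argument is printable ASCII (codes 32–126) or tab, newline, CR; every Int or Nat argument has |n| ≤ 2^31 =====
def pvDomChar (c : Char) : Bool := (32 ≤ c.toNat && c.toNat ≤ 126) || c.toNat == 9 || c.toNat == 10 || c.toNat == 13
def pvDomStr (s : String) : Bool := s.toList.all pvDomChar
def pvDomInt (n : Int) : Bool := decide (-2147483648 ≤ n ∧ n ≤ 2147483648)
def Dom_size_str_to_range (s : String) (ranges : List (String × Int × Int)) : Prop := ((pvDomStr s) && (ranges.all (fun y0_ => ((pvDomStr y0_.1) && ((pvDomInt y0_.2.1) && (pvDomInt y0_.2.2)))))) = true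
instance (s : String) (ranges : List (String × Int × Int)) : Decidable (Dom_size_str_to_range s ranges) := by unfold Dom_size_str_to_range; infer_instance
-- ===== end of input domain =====

-- B inverts the traversal: one pass over the sentence words keeping the minimum matched
-- key position via a precomputed key->position dict, instead of A's scan over the range
-- keys with per-key word-list searches and early returns; objective: alternative (no speed claim).

def pvWordSubs : List (String × String) := [("little", "small"), ("big", "large")]
def pvModifiers : List String := ["very", "extremely", "really"]

-- dict lookup d[k] / d.get(k) as first-match on the association list; exact for the dicts here
-- (pvWordSubs is a literal with distinct keys)
def pvAssoc? {ν : Type} (d : List (String × ν)) (k : String) : Option ν :=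
  (d.find? (fun p => p.1 == k)).map (·.2)

-- ===== PORT A =====
-- A's in-place substitution loop (words[i] = WORD_SUBS[words[i]] when present), element-wise
def pvSubWordsA (ws : List String) : List String :=
  ws.map (fun w => match pvAssoc? pvWordSubs w with | some v => v | none => w)

-- A's 'for i, (word, rng) in enumerate(ranges.items())' loop with its early returns
def pvALoop (words : List String) (is_modded : Bool) (med_idx max_idx : Int)
    (vals : List (Int × Int)) : Int → List (String × Int × Int) → Option (Int × Int)
  | _, [] => none
  | i, (word, _) :: rest =>
    if words.contains word then
      if is_modded ∧ i < med_idx ∧ i > 0 then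
        some ((PySem.List.pyGet? vals (i - 1)).getD (0, 0))
      else if is_modded ∧ i > med_idx ∧ i < max_idx - 1 then
        some ((PySem.List.pyGet? vals (i + 1)).getD (0, 0))
      else
        some ((PySem.List.pyGet? vals i).getD (0, 0))
    else pvALoop words is_modded med_idx max_idx vals (i + 1) rest

def size_str_to_range (s : String) (ranges : List (String × Int × Int)) : Int × Int :=
  let words := pvSubWordsA (PySem.Str.split₀ s)
  let is_modded := pvModifiers.any (fun m => words.contains m)
  let keys := ranges.map (·.1)
  match PySem.List.index? keys "medium" with
  | none => (0, 0)  -- Python raises ValueError here; excluded by Pre_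
  | some med_idx =>
    let vals := ranges.map (·.2)
    match pvALoop words is_modded (med_idx : Int) (keys.length : Int) vals 0 ranges with
    | some r => r
    | none => (pvAssoc? ranges "medium").getD (0, 0)

-- ===== PORT B =====
-- B's 'pos = {k: i for i, k in enumerate(keys)}'
def pvBPos (keys : List String) : PySem.Dict String Int :=
  (PySem.List.enumerate keys).foldl (fun d p => d.insert p.2 p.1) PySem.Dict.empty

-- B's single 'for w in s.split():' loop carrying (is_modded, idx)
def pvBLoop (pos : PySem.Dict String Int) (n : Int) :
    Bool → Int → List String → Bool × Int
  | m, idx, [] => (m, idx)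
  | m, idx, w0 :: rest =>
    let w := (pvAssoc? pvWordSubs w0).getD w0
    let m' := m || pvModifiers.contains w
    let j := pos.getD w n
    pvBLoop pos n m' (if j < idx then j else idx) rest

def size_str_to_range_alt (s : String) (ranges : List (String × Int × Int)) : Int × Int :=
  let keys := ranges.map (·.1)
  let vals := ranges.map (·.2)
  let n : Int := keys.length
  match PySem.List.index? keys "medium" with
  | none => (0, 0)  -- Python raises ValueError here; excluded by Pre_
  | some med_idx =>
    let pos := pvBPos keys
    let st := pvBLoop pos n false n (PySem.Str.split₀ s)
    let idx1 := if st.2 == n then (med_idx : Int) else st.2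
    let idx :=
      if st.1 then
        if 0 < idx1 ∧ idx1 < (med_idx : Int) then idx1 - 1
        else if (med_idx : Int) < idx1 ∧ idx1 < n - 1 then idx1 + 1
        else idx1
      else idx1
    (PySem.List.pyGet? vals idx).getD (0, 0)

-- ===== PRECONDITION & SPEC =====
-- Pre_ excludes ranges without a "medium" key (A raises ValueError there) and ranges with
-- duplicate keys, on which the association list does not represent any Python dict argument
-- (a Python dict literal silently collapses duplicate keys before A ever sees them).
def Pre_size_str_to_range (_s : String) (ranges : List (String × Int × Int)) : Prop :=
  "medium" ∈ ranges.map (·.1) ∧ (ranges.map (·.1)).Nodup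
instance (s : String) (ranges : List (String × Int × Int)) : Decidable (Pre_size_str_to_range s ranges) := by unfold Pre_size_str_to_range; infer_instance

def pvWitness_size_str_to_range : String × (List (String × Int × Int)) :=
  ("very big thing", [("small", (3, 4)), ("medium", (4, 6)), ("large", (6, 10))])

def Spec_size_str_to_range (s : String) (ranges : List (String × Int × Int)) (out : Int × Int) : Prop := out = size_str_to_range_alt s ranges
instance (s : String) (ranges : List (String × Int × Int)) (out : Int × Int) : Decidable (Spec_size_str_to_range s ranges out) := by unfold Spec_size_str_to_range; infer_instance

-- ===== CLAIM (what is proved, stated in full; the proofs are below) =====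
def Claim_equal_size_str_to_range : Prop := ∀ (s : String) (ranges : List (String × Int × Int)), Dom_size_str_to_range s ranges → Pre_size_str_to_range s ranges → Spec_size_str_to_range s ranges (size_str_to_range s ranges)

-- ===== LEMMAS AND PROOFS =====

-- Python's word substitution, as B applies it word by word
def pvSub (w : String) : String := (pvAssoc? pvWordSubs w).getD w

-- first index i with keys[i] ∈ ws (the index A's scan stops at)
def pvFindK (ws : List String) : List String → Option Nat
  | [] => none
  | k :: rest => if ws.contains k then some 0 else (pvFindK ws rest).map (· + 1)

theorem subWordsA_eq (ws : List String) : pvSubWordsA ws = ws.map pvSub := by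
  unfold pvSubWordsA pvSub
  apply List.map_congr_left
  intro w _
  cases pvAssoc? pvWordSubs w <;> rfl

theorem findK_lt (ws : List String) : ∀ keys j, pvFindK ws keys = some j → j < keys.length := by
  intro keys
  induction keys with
  | nil => intro j h; simp [pvFindK] at h
  | cons k rest ih =>
    intro j h
    unfold pvFindK at h
    by_cases hc : ws.contains k = true
    · rw [if_pos hc] at h
      cases h
      simp
    · rw [if_neg hc] at h
      obtain ⟨j', hj', hadd⟩ := Option.map_eq_some_iff.mp h
      have := ih j' hj'
      simp only [List.length_cons]
      omega

-- A's scan over ranges = shifted lookup at pvFindK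
theorem aloop_eq_findK (words : List String) (m : Bool) (med n : Int) (vals : List (Int × Int)) :
    ∀ (l : List (String × Int × Int)) (i : Int),
      pvALoop words m med n vals i l =
        (pvFindK words (l.map (·.1))).map (fun (j : Nat) =>
          let x := i + (j : Int)
          (PySem.List.pyGet? vals
            (if m ∧ x < med ∧ x > 0 then x - 1
             else if m ∧ x > med ∧ x < n - 1 then x + 1
             else x)).getD (0, 0)) := by
  intro l
  induction l with
  | nil => intro i; rfl
  | cons p rest ih =>
    intro i
    obtain ⟨word, rng⟩ := p
    rw [List.map_cons]
    unfold pvALoop pvFindK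
    by_cases hc : words.contains word = true
    · rw [if_pos hc, if_pos hc]
      simp only [Option.map_some, Nat.cast_zero, add_zero]
      split_ifs <;> rfl
    · rw [if_neg hc, if_neg hc, ih (i + 1)]
      cases hf : pvFindK words (rest.map (·.1)) with
      | none => simp
      | some j =>
        simp only [Option.map_some]
        have hx : i + 1 + (j : Int) = i + ((j : Nat) + 1 : Nat) := by push_cast; ring
        rw [hx]

-- the position dict reads back the (unique) index of a key
theorem bpos_aux (w : String) (n : Int) :
    ∀ (keys : List String) (s : Int) (d : PySem.Dict String Int), keys.Nodup →
      ((PySem.List.enumerate keys s).foldl (fun d p => d.insert p.2 p.1) d).getD w n =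
        match PySem.List.index? keys w with
        | some i => s + (i : Int)
        | none => d.getD w n := by
  intro keys
  induction keys with
  | nil => intro s d _; simp [PySem.List.enumerate_nil, PySem.List.index?_eq_idxOf?, List.idxOf?]
  | cons k rest ih =>
    intro s d hnd
    obtain ⟨hk_not, hnd'⟩ := List.nodup_cons.mp hnd
    rw [PySem.List.enumerate_cons, List.foldl_cons, ih (s + 1) _ hnd']
    by_cases hk : k = w
    · subst hk
      rw [PySem.List.index?_cons_self]
      have hnone : PySem.List.index? rest k = none :=
        (PySem.List.index?_eq_none_iff rest k).mpr hk_not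
      rw [hnone]
      simp [PySem.Dict.getD_insert_self]
    · rw [PySem.List.index?_cons_of_ne rest hk]
      cases h : PySem.List.index? rest w with
      | none =>
        simp only [Option.map_none]
        exact PySem.Dict.getD_insert_of_ne d s n (fun hwk => hk hwk.symm)
      | some i =>
        simp only [Option.map_some]
        push_cast
        ring

theorem bpos_getD (keys : List String) (hnd : keys.Nodup) (w : String) (n : Int) :
    (pvBPos keys).getD w n =
      match PySem.List.index? keys w with
      | some i => (i : Int)
      | none => n := by
  unfold pvBPos
  rw [bpos_aux w n keys 0 PySem.Dict.empty hnd]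
  cases PySem.List.index? keys w <;> simp [PySem.Dict.getD_empty]

-- B's fold splits into the modifier flag and the min-position fold
theorem bloop_split (pos : PySem.Dict String Int) (n : Int) :
    ∀ (ws : List String) (m : Bool) (idx : Int),
      pvBLoop pos n m idx ws =
        (m || ws.any (fun w => pvModifiers.contains (pvSub w)),
         ws.foldl (fun a w => if pos.getD (pvSub w) n < a then pos.getD (pvSub w) n else a) idx) := by
  intro ws
  induction ws with
  | nil => intro m idx; simp [pvBLoop]
  | cons w rest ih =>
    intro m idx
    simp only [pvBLoop, List.any_cons, List.foldl_cons, ih, Bool.or_assoc]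
    rfl

-- value B's dict lookup yields: the key's index in keys, or keys.length when absent
def pvIdxVal (keys : List String) (w : String) : Int :=
  match PySem.List.index? keys w with
  | some i => (i : Int)
  | none => (keys.length : Int)

theorem pvIdxVal_nonneg (keys : List String) (w : String) : 0 ≤ pvIdxVal keys w := by
  unfold pvIdxVal
  cases PySem.List.index? keys w <;> exact Int.natCast_nonneg _

theorem pvIdxVal_cons_self (k : String) (rest : List String) :
    pvIdxVal (k :: rest) k = 0 := by
  unfold pvIdxVal
  rw [PySem.List.index?_cons_self]
  rfl

theorem pvIdxVal_cons_of_ne (k : String) (rest : List String) (w : String) (h : w ≠ k) :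
    pvIdxVal (k :: rest) w = pvIdxVal rest w + 1 := by
  unfold pvIdxVal
  rw [PySem.List.index?_cons_of_ne rest (fun hkw => h hkw.symm)]
  cases PySem.List.index? rest w with
  | none => simp
  | some i => simp only [Option.map_some]; push_cast; ring

-- the min-accumulating fold: bounds and a shift law
theorem foldl_min_le_init (g : String → Int) :
    ∀ (ws : List String) (a : Int),
      ws.foldl (fun a w => if g w < a then g w else a) a ≤ a := by
  intro ws
  induction ws with
  | nil => intro a; simp
  | cons w rest ih =>
    intro a
    simp only [List.foldl_cons]
    split_ifs with h
    · have := ih (g w); omega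
    · exact ih a

theorem foldl_min_le_mem (g : String → Int) :
    ∀ (ws : List String) (a : Int) (w : String), w ∈ ws →
      ws.foldl (fun a w => if g w < a then g w else a) a ≤ g w := by
  intro ws
  induction ws with
  | nil => intro a w h; simp at h
  | cons v rest ih =>
    intro a w hw
    simp only [List.foldl_cons]
    rcases List.mem_cons.mp hw with rfl | hmem
    · split_ifs with h
      · have := foldl_min_le_init g rest (g w); omega
      · have := foldl_min_le_init g rest a; omega
    · exact ih _ w hmem

theorem le_foldl_min (g : String → Int) :
    ∀ (ws : List String) (a c : Int), c ≤ a → (∀ w ∈ ws, c ≤ g w) →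
      c ≤ ws.foldl (fun a w => if g w < a then g w else a) a := by
  intro ws
  induction ws with
  | nil => intro a c hc _; simpa using hc
  | cons v rest ih =>
    intro a c hc hall
    simp only [List.foldl_cons]
    have hv := hall v (List.mem_cons_self ..)
    have hrest : ∀ w ∈ rest, c ≤ g w := fun w hw => hall w (List.mem_cons_of_mem _ hw)
    split_ifs with h
    · exact ih _ c hv hrest
    · exact ih _ c hc hrest

theorem foldl_min_shift (g h : String → Int) :
    ∀ (ws : List String) (a : Int), (∀ w ∈ ws, g w = h w + 1) →
      ws.foldl (fun a w => if g w < a then g w else a) (a + 1)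
        = ws.foldl (fun a w => if h w < a then h w else a) a + 1 := by
  intro ws
  induction ws with
  | nil => intro a _; simp
  | cons v rest ih =>
    intro a hall
    have hv := hall v (List.mem_cons_self ..)
    have hrest : ∀ w ∈ rest, g w = h w + 1 := fun w hw => hall w (List.mem_cons_of_mem _ hw)
    simp only [List.foldl_cons, hv]
    by_cases hc : h v < a
    · rw [if_pos (by omega : h v + 1 < a + 1), if_pos hc, ih _ hrest]
    · rw [if_neg (by omega : ¬ (h v + 1 < a + 1)), if_neg hc, ih _ hrest]

theorem foldl_congr_fun (g h : String → Int) (hgh : ∀ w, g w = h w) :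
    ∀ (ws : List String) (a : Int),
      ws.foldl (fun a w => if g w < a then g w else a) a
        = ws.foldl (fun a w => if h w < a then h w else a) a := by
  intro ws
  induction ws with
  | nil => intro a; rfl
  | cons v rest ih =>
    intro a
    simp only [List.foldl_cons, hgh v, ih]

theorem foldl_sub_map (keys ws : List String) (a : Int) :
    ws.foldl (fun a w => if pvIdxVal keys (pvSub w) < a then pvIdxVal keys (pvSub w) else a) a
      = (ws.map pvSub).foldl (fun a v => if pvIdxVal keys v < a then pvIdxVal keys v else a) a := by
  rw [List.foldl_map]

-- the min-position fold computes pvFindK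
theorem minfold_eq_findK : ∀ (keys ws : List String),
    ws.foldl (fun a w => if pvIdxVal keys w < a then pvIdxVal keys w else a) (keys.length : Int)
      = match pvFindK ws keys with
        | some j => (j : Int)
        | none => (keys.length : Int) := by
  intro keys
  induction keys with
  | nil =>
    intro ws
    have hnone : pvFindK ws ([] : List String) = none := rfl
    rw [hnone]
    have h1 := foldl_min_le_init (pvIdxVal []) ws ((0 : Nat) : Int)
    have h2 := le_foldl_min (pvIdxVal []) ws ((0 : Nat) : Int) 0 (by simp)
      (fun w _ => pvIdxVal_nonneg [] w)
    simp only [List.length_nil, Nat.cast_zero] at h1 h2 ⊢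
    omega
  | cons k rest ih =>
    intro ws
    unfold pvFindK
    by_cases hc : ws.contains k = true
    · have hkmem : k ∈ ws := by
        rw [List.contains_eq_mem, decide_eq_true_eq] at hc; exact hc
      rw [if_pos hc]
      have hub := foldl_min_le_mem (pvIdxVal (k :: rest)) ws ((k :: rest).length : Int) k hkmem
      have hlb := le_foldl_min (pvIdxVal (k :: rest)) ws ((k :: rest).length : Int) 0
        (by positivity) (fun w _ => pvIdxVal_nonneg _ w)
      rw [pvIdxVal_cons_self] at hub
      have hred : (match (some (0 : Nat)) with
          | some j => ((j : Nat) : Int)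
          | none => (((k :: rest).length : Nat) : Int)) = (0 : Int) := rfl
      rw [hred]
      omega
    · rw [if_neg hc]
      have hne : ∀ w ∈ ws, w ≠ k := by
        intro w hw hwk
        subst hwk
        rw [List.contains_eq_mem, decide_eq_true_eq] at hc
        exact hc hw
      have hshift : ∀ w ∈ ws, pvIdxVal (k :: rest) w = pvIdxVal rest w + 1 :=
        fun w hw => pvIdxVal_cons_of_ne k rest w (hne w hw)
      have hlen : (((k :: rest).length : Nat) : Int) = ((rest.length : Nat) : Int) + 1 := by
        simp
      rw [hlen, foldl_min_shift (pvIdxVal (k :: rest)) (pvIdxVal rest) ws _ hshift, ih ws]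
      cases hf : pvFindK ws rest with
      | none => simp
      | some j => simp

theorem getmed (ranges : List (String × Int × Int)) :
    ∀ (med : Nat), PySem.List.index? (ranges.map (·.1)) "medium" = some med →
      PySem.List.pyGet? (ranges.map (·.2)) (med : Int) = pvAssoc? ranges "medium" := by
  induction ranges with
  | nil => intro med h; simp [PySem.List.index?] at h
  | cons p rest ih =>
    intro med h
    obtain ⟨k, v⟩ := p
    rw [List.map_cons] at h
    dsimp only at h
    by_cases hk : k = "medium"
    · subst hk
      rw [PySem.List.index?_cons_self] at h
      cases h
      simp [pvAssoc?]
    · rw [PySem.List.index?_cons_of_ne (List.map (fun x => x.1) rest) hk] at h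
      cases hm : PySem.List.index? (rest.map (·.1)) "medium" with
      | none => rw [hm] at h; simp at h
      | some m =>
        rw [hm] at h; simp at h
        subst h
        have hrec := ih m hm
        rw [List.map_cons]
        rw [show ((m + 1 : Nat) : Int) = (m : Int) + 1 by push_cast; ring]
        rw [PySem.List.pyGet?_cons_succ, hrec]
        simp [pvAssoc?, hk]

theorem any_sub_comm (ws : List String) :
    ws.any (fun w => pvModifiers.contains (pvSub w))
      = pvModifiers.any (fun m => (ws.map pvSub).contains m) := by
  rw [Bool.eq_iff_iff]
  simp only [List.any_eq_true, List.contains_eq_mem, List.mem_map, decide_eq_true_eq]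
  constructor
  · rintro ⟨w, hw, hm⟩; exact ⟨pvSub w, hm, w, hw, rfl⟩
  · rintro ⟨m, hm, w, hw, rfl⟩; exact ⟨w, hw, hm⟩

-- ===== VERDICT (by name: the statement is the Claim_ definition above) =====
theorem size_str_to_range_spec : Claim_equal_size_str_to_range := by
  intro s ranges _ hpre
  obtain ⟨hmed, hnd⟩ := hpre
  unfold Spec_size_str_to_range size_str_to_range size_str_to_range_alt
  dsimp only
  rw [subWordsA_eq]
  cases hidx : PySem.List.index? (ranges.map (·.1)) "medium" with
  | none => rfl
  | some med =>
    dsimp only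
    rw [bloop_split, aloop_eq_findK]
    have hpos : ∀ w, (pvBPos (ranges.map (·.1))).getD w ((ranges.map (·.1)).length : Int)
        = pvIdxVal (ranges.map (·.1)) w := by
      intro w
      rw [bpos_getD (ranges.map (·.1)) hnd w]
      rfl
    rw [foldl_congr_fun
      (fun w => (pvBPos (ranges.map (·.1))).getD (pvSub w) ((ranges.map (·.1)).length : Int))
      (fun w => pvIdxVal (ranges.map (·.1)) (pvSub w)) (fun w => hpos (pvSub w))]
    rw [foldl_sub_map, minfold_eq_findK, ← any_sub_comm]
    simp only [Bool.false_or]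
    have hj_lt := findK_lt (List.map pvSub (PySem.Str.split₀ s)) (ranges.map (·.1))
    cases hf : pvFindK (List.map pvSub (PySem.Str.split₀ s)) (ranges.map (·.1)) with
    | none =>
      simp only [Option.map_none, beq_self_eq_true, if_true]
      have hcoll : (if ((PySem.Str.split₀ s).any fun w => pvModifiers.contains (pvSub w)) = true then
            if 0 < (med : Int) ∧ (med : Int) < (med : Int) then (med : Int) - 1
            else if (med : Int) < (med : Int) ∧ (med : Int) < ((ranges.map (·.1)).length : Int) - 1
              then (med : Int) + 1 else (med : Int)
          else (med : Int)) = (med : Int) := by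
        split_ifs <;> first | rfl | omega
      rw [hcoll, getmed ranges med hidx]
    | some j =>
      have hj : j < (ranges.map (·.1)).length := hj_lt j hf
      have hne : (((j : Nat) : Int) == (((ranges.map (·.1)).length : Nat) : Int)) = false := by
        rw [beq_eq_false_iff_ne]
        intro h
        rw [Int.natCast_inj] at h
        omega
      simp only [Option.map_some, hne, Bool.false_eq_true, if_false, zero_add]
      cases hmod : (PySem.Str.split₀ s).any (fun w => pvModifiers.contains (pvSub w)) <;>
        (simp only [Bool.false_eq_true, false_and, true_and, if_false, if_true]
         try split_ifs <;> first | rfl | omega)
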